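-- pv_equiv track=rewrite | github.com/dheerosaur/leetcode-practice | python/1053.previous-perm.py | prevPermOpt1
-- ===== SOURCE A (Python) =====
-- from typing import List
--
-- def prevPermOpt1(A: List[int]) -> List[int]:
--     left = len(A) - 2
--     while left >= 0 and A[left] <= A[left + 1]:
--         left -= 1
--
--     if left < 0:
--         return A
--
--     right = len(A) - 1
--     while A[right] >= A[left]:
--         right -= 1
--     while A[right] == A[right - 1]:
--         right -= 1
--     A[left], A[right] = A[right], A[left]
--     return A
-- ===== SOURCE B (Python) =====
-- from typing import List
--
-- def prevPermOpt1(A: List[int]) -> List[int]: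
--     n = len(A)
--     left = -1
--     for i in range(n - 1):
--         if A[i] > A[i + 1]:
--             left = i
--     if left == -1:
--         return A
--     best = left + 1
--     for j in range(left + 2, n):
--         if A[best] < A[j] < A[left]:
--             best = j
--     A[left], A[best] = A[best], A[left]
--     return A
-- ===== Notes on version B (the rewrite author's own statement) =====
-- stated objective: alternative
-- what changed: Both backward scans are replaced by forward passes: the last descent index is tracked in one forward sweep, and the swap partner is found by a forward maximum-below-pivot scan with a strict-greater update (leftmost maximal wins), instead of exploiting the sorted suffix by scanning backward and backing over duplicates.
import Mathlib
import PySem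

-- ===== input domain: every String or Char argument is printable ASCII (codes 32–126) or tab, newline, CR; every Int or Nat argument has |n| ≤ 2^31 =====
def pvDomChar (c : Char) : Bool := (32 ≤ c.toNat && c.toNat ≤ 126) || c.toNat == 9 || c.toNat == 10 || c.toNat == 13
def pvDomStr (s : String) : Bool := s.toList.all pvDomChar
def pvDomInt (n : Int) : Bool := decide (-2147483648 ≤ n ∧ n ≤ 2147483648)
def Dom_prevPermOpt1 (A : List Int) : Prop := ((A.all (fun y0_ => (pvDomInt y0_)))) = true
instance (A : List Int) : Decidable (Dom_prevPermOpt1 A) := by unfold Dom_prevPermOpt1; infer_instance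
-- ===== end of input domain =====

-- B replaces both backward scans of A by forward passes (last-descent tracking, then a
-- forward leftmost-maximum-below-pivot scan); equivalence of the RETURN value is proved
-- (the Python versions also mutate their argument in place, identically).

-- shared indexing helper: A[i] (all indices reached by either program are in range, proved below)
def pvG (A : List Int) (i : Int) : Int := PySem.List.pyGetD A i 0

-- shared: the Python line 'A[i], A[j] = A[j], A[i]' followed by 'return A' (both programs end with it)
def pvSwap (A : List Int) (i j : Int) : List Int :=
  (A.set i.toNat (pvG A j)).set j.toNat (pvG A i)

-- ===== PORT A =====
-- 'while left >= 0 and A[left] <= A[left + 1]: left -= 1' (fuel = len(A) bounds the iterations)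
def pvFindLeft (A : List Int) : Int → Nat → Int
  | left, 0 => left
  | left, fuel+1 =>
    if 0 ≤ left ∧ pvG A left ≤ pvG A (left+1) then pvFindLeft A (left-1) fuel else left

-- 'while A[right] >= A[left]: right -= 1'
def pvRight1 (A : List Int) (pl : Int) : Int → Nat → Int
  | r, 0 => r
  | r, fuel+1 => if pl ≤ pvG A r then pvRight1 A pl (r-1) fuel else r

-- 'while A[right] == A[right - 1]: right -= 1'
def pvRight2 (A : List Int) : Int → Nat → Int
  | r, 0 => r
  | r, fuel+1 => if pvG A r = pvG A (r-1) then pvRight2 A (r-1) fuel else r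

def prevPermOpt1 (A : List Int) : List Int :=
  let left := pvFindLeft A ((A.length : Int) - 2) A.length
  if left < 0 then A
  else
    let right1 := pvRight1 A (pvG A left) ((A.length : Int) - 1) A.length
    let right := pvRight2 A right1 A.length
    pvSwap A left right

-- ===== PORT B =====
def prevPermOpt1_alt (A : List Int) : List Int :=
  let n : Int := A.length
  let left := (PySem.List.pyRange 0 (n-1) 1).foldl
    (fun l i => if pvG A (i+1) < pvG A i then i else l) (-1)
  if left = -1 then A
  else
    let best := (PySem.List.pyRange (left+2) n 1).foldl
      (fun b j => if pvG A b < pvG A j ∧ pvG A j < pvG A left then j else b) (left+1)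
    pvSwap A left best

-- ===== PRECONDITION & SPEC =====
def Spec_prevPermOpt1 (A : List Int) (out : List Int) : Prop := out = prevPermOpt1_alt A
instance (A : List Int) (out : List Int) : Decidable (Spec_prevPermOpt1 A out) := by unfold Spec_prevPermOpt1; infer_instance

-- ===== CLAIM (what is proved, stated in full; the proofs are below) =====
def Claim_equal_prevPermOpt1 : Prop := ∀ (A : List Int), Dom_prevPermOpt1 A → Spec_prevPermOpt1 A (prevPermOpt1 A)

-- ===== LEMMAS AND PROOFS =====

-- characterisation of the 'left' index both programs compute: either negative with the whole
-- array non-descending, or the largest descent position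
def LeftSpec (A : List Int) (l : Int) : Prop :=
  (l < 0 ∧ ∀ i : Int, 0 ≤ i → i < (A.length : Int) - 1 → pvG A i ≤ pvG A (i+1)) ∨
  (0 ≤ l ∧ l < (A.length : Int) - 1 ∧ pvG A (l+1) < pvG A l ∧
    ∀ i : Int, l < i → i < (A.length : Int) - 1 → pvG A i ≤ pvG A (i+1))

lemma pvFindLeft_spec (A : List Int) :
    ∀ (fuel : Nat) (left : Int), left ≤ (A.length : Int) - 2 → (left+1).toNat ≤ fuel →
      (∀ i : Int, left < i → i < (A.length : Int) - 1 → pvG A i ≤ pvG A (i+1)) →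
      LeftSpec A (pvFindLeft A left fuel) := by
  intro fuel
  induction fuel with
  | zero =>
    intro left hle hf hasc
    have hneg : left < 0 := by omega
    exact Or.inl ⟨hneg, fun i h0 hi => hasc i (by omega) hi⟩
  | succ m ih =>
    intro left hle hf hasc
    rw [pvFindLeft]
    split
    · next h =>
      exact ih (left-1) (by omega) (by omega) (fun i hlt hi => by
        rcases lt_or_ge left i with h' | h'
        · exact hasc i h' hi
        · have : i = left := by omega
          subst this; exact h.2)
    · next h =>
      rcases lt_or_ge left 0 with hneg | hpos
      · exact Or.inl ⟨hneg, fun i h0 hi => hasc i (by omega) hi⟩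
      · have : ¬ pvG A left ≤ pvG A (left+1) := fun hc => h ⟨hpos, hc⟩
        exact Or.inr ⟨hpos, by omega, by omega, hasc⟩

def InvL (A : List Int) (t l : Int) : Prop :=
  (l = -1 ∧ ∀ i : Int, 0 ≤ i → i < t → pvG A i ≤ pvG A (i+1)) ∨
  (0 ≤ l ∧ l < t ∧ pvG A (l+1) < pvG A l ∧
    ∀ i : Int, l < i → i < t → pvG A i ≤ pvG A (i+1))

lemma foldlLeft_aux (A : List Int) :
    ∀ (k : Nat) (a l : Int), (((A.length : Int) - 1) - a).toNat = k → 0 ≤ a → InvL A a l →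
      InvL A (max a ((A.length : Int) - 1))
        ((PySem.List.pyRange a ((A.length : Int) - 1) 1).foldl
          (fun l i => if pvG A (i+1) < pvG A i then i else l) l) := by
  intro k
  induction k with
  | zero =>
    intro a l hk ha0 hinv
    have hge : (A.length : Int) - 1 ≤ a := by omega
    rw [PySem.List.pyRange_one]
    have : ((A.length : Int) - 1 - a).toNat = 0 := by omega
    rw [this]
    simpa [max_eq_left hge] using hinv
  | succ m ih =>
    intro a l hk ha0 hinv
    have hlt : a < (A.length : Int) - 1 := by omega
    rw [PySem.List.pyRange_one_cons hlt, List.foldl_cons]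
    have hstep : InvL A (a+1) (if pvG A (a+1) < pvG A a then a else l) := by
      split
      · next h => exact Or.inr ⟨ha0, by omega, h, fun i hlt' hi => by omega⟩
      · next h =>
        have hasc : pvG A a ≤ pvG A (a+1) := by omega
        rcases hinv with ⟨h1, h2⟩ | ⟨h1, h2, h3, h4⟩
        · exact Or.inl ⟨h1, fun i h0 hi => by
            rcases lt_or_ge i a with h' | h'
            · exact h2 i h0 h'
            · have : i = a := by omega
              subst this; exact hasc⟩
        · exact Or.inr ⟨h1, by omega, h3, fun i hlt' hi => by
            rcases lt_or_ge i a with h' | h'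
            · exact h4 i hlt' h'
            · have : i = a := by omega
              subst this; exact hasc⟩
    have := ih (a+1) _ (by omega) (by omega) hstep
    have hmax1 : max (a+1) ((A.length : Int) - 1) = (A.length : Int) - 1 := by omega
    have hmax2 : max a ((A.length : Int) - 1) = (A.length : Int) - 1 := by omega
    rw [hmax1] at this
    rw [hmax2]
    exact this

lemma foldlLeft_spec (A : List Int) :
    LeftSpec A ((PySem.List.pyRange 0 ((A.length : Int)-1) 1).foldl
      (fun l i => if pvG A (i+1) < pvG A i then i else l) (-1)) := by
  have h0 : InvL A 0 (-1) := Or.inl ⟨rfl, fun i h0 hi => by omega⟩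
  have := foldlLeft_aux A ((((A.length : Int) - 1) - 0).toNat) 0 (-1) rfl (by omega) h0
  rcases this with ⟨h1, h2⟩ | ⟨h1, h2, h3, h4⟩
  · exact Or.inl ⟨by omega, fun i hi hlt => h2 i hi (by omega)⟩
  · exact Or.inr ⟨h1, by omega, h3, fun i hi hlt => h4 i hi (by omega)⟩

lemma LeftSpec_unique (A : List Int) (l₁ l₂ : Int) (h₁ : LeftSpec A l₁) (h₂ : LeftSpec A l₂)
    (hn₁ : 0 ≤ l₁) (hn₂ : 0 ≤ l₂) : l₁ = l₂ := by
  rcases h₁ with ⟨h, _⟩ | ⟨_, hb₁, hd₁, ha₁⟩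
  · omega
  rcases h₂ with ⟨h, _⟩ | ⟨_, hb₂, hd₂, ha₂⟩
  · omega
  by_contra hne
  rcases lt_or_gt_of_ne hne with h | h
  · exact absurd (ha₁ l₂ h hb₂) (by omega)
  · exact absurd (ha₂ l₁ h hb₁) (by omega)

lemma LeftSpec_neg (A : List Int) (l₁ l₂ : Int) (h₁ : LeftSpec A l₁) (h₂ : LeftSpec A l₂)
    (hn₁ : l₁ < 0) : l₂ < 0 := by
  rcases h₂ with ⟨h, _⟩ | ⟨hb₂, hlt₂, hd₂, _⟩
  · omega
  rcases h₁ with ⟨_, ha₁⟩ | ⟨hb₁, _⟩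
  · exact absurd (ha₁ l₂ hb₂ hlt₂) (by omega)
  · omega

-- the suffix after the last descent is non-decreasing
lemma suffix_sorted (A : List Int) (l : Int)
    (hasc : ∀ i : Int, l < i → i < (A.length : Int) - 1 → pvG A i ≤ pvG A (i+1)) :
    ∀ i j : Int, l < i → i ≤ j → j ≤ (A.length : Int) - 1 → pvG A i ≤ pvG A j := by
  have key : ∀ (k : Nat) (i j : Int), (j - i).toNat = k → l < i → i ≤ j →
      j ≤ (A.length : Int) - 1 → pvG A i ≤ pvG A j := by
    intro k
    induction k with
    | zero =>
      intro i j hk h1 h2 h3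
      have : i = j := by omega
      exact le_of_eq (by rw [this])
    | succ m ih =>
      intro i j hk h1 h2 h3
      have hij : i < j := by omega
      calc pvG A i ≤ pvG A (j-1) := ih i (j-1) (by omega) h1 (by omega) (by omega)
        _ ≤ pvG A j := by
            have := hasc (j-1) (by omega) (by omega)
            simpa using this
  exact fun i j h1 h2 h3 => key (j - i).toNat i j rfl h1 h2 h3

lemma pvRight1_spec (A : List Int) (l : Int) (hd : pvG A (l+1) < pvG A l) :
    ∀ (fuel : Nat) (r : Int), l + 1 ≤ r → r ≤ (A.length : Int) - 1 →
      (∀ j : Int, r < j → j ≤ (A.length : Int) - 1 → pvG A l ≤ pvG A j) →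
      (r - l).toNat ≤ fuel →
      l + 1 ≤ pvRight1 A (pvG A l) r fuel ∧ pvRight1 A (pvG A l) r fuel ≤ r ∧
      pvG A (pvRight1 A (pvG A l) r fuel) < pvG A l ∧
      (∀ j : Int, pvRight1 A (pvG A l) r fuel < j → j ≤ (A.length : Int) - 1 → pvG A l ≤ pvG A j) := by
  intro fuel
  induction fuel with
  | zero => intro r h1 h2 h3 h4; omega
  | succ m ih =>
    intro r h1 h2 hinv hf
    rw [pvRight1]
    split
    · next h =>
      have hr : l + 1 < r := by
        rcases eq_or_lt_of_le h1 with he | hlt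
        · exfalso; rw [← he] at h; omega
        · exact hlt
      have hrec := ih (r-1) (by omega) (by omega)
        (fun j hj1 hj2 => by
          rcases lt_or_ge r j with h' | h'
          · exact hinv j h' hj2
          · have : j = r := by omega
            subst this; exact h)
        (by omega)
      exact ⟨hrec.1, by omega, hrec.2.2⟩
    · next h => exact ⟨h1, le_refl r, by omega, hinv⟩

lemma pvRight2_spec (A : List Int) (l v : Int) (hv : v < pvG A l) :
    ∀ (fuel : Nat) (r : Int), l + 1 ≤ r → pvG A r = v → (r - l).toNat ≤ fuel →
      l + 1 ≤ pvRight2 A r fuel ∧ pvRight2 A r fuel ≤ r ∧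
      pvG A (pvRight2 A r fuel) = v ∧ pvG A (pvRight2 A r fuel - 1) ≠ v := by
  intro fuel
  induction fuel with
  | zero => intro r h1 h2 h3; omega
  | succ m ih =>
    intro r h1 hv' hf
    rw [pvRight2]
    split
    · next h =>
      have hr : l + 1 < r := by
        rcases eq_or_lt_of_le h1 with he | hlt
        · exfalso
          rw [← he] at h hv'
          have : pvG A (l+1-1) = v := by rw [← h, hv']
          simp at this
          omega
        · exact hlt
      have := ih (r-1) (by omega) (by rw [← h, hv']) (by omega)
      exact ⟨this.1, by omega, this.2.2⟩
    · next h =>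
      refine ⟨h1, le_refl r, hv', ?_⟩
      rw [hv'] at h
      exact fun hc => h hc.symm

-- invariant for B's forward 'best' scan
def Inv2 (A : List Int) (l t b : Int) : Prop :=
  l + 1 ≤ b ∧ b < t ∧ pvG A b < pvG A l ∧
  (∀ j : Int, l + 1 ≤ j → j < t → pvG A j < pvG A l → pvG A j ≤ pvG A b) ∧
  (∀ j : Int, l + 1 ≤ j → j < b → pvG A j ≠ pvG A b)

lemma foldlBest_spec (A : List Int) (l : Int) :
    ∀ (t b : Int), Inv2 A l t b →
      Inv2 A l (max t (A.length : Int))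
        ((PySem.List.pyRange t (A.length : Int) 1).foldl
          (fun b j => if pvG A b < pvG A j ∧ pvG A j < pvG A l then j else b) b) := by
  have key : ∀ (k : Nat) (t b : Int), ((A.length : Int) - t).toNat = k → Inv2 A l t b →
      Inv2 A l (max t (A.length : Int))
        ((PySem.List.pyRange t (A.length : Int) 1).foldl
          (fun b j => if pvG A b < pvG A j ∧ pvG A j < pvG A l then j else b) b) := by
    intro k
    induction k with
    | zero =>
      intro t b hk hinv
      have hge : (A.length : Int) ≤ t := by omega
      rw [PySem.List.pyRange_one]
      have : ((A.length : Int) - t).toNat = 0 := by omega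
      rw [this]
      simpa [max_eq_left hge] using hinv
    | succ m ih =>
      intro t b hk hinv
      have hlt : t < (A.length : Int) := by omega
      rw [PySem.List.pyRange_one_cons hlt, List.foldl_cons]
      obtain ⟨hb1, hb2, hb3, hmax, hfirst⟩ := hinv
      have hstep : Inv2 A l (t+1) (if pvG A b < pvG A t ∧ pvG A t < pvG A l then t else b) := by
        split
        · next h =>
          refine ⟨by omega, by omega, h.2, ?_, ?_⟩
          · intro j hj1 hj2 hj3
            rcases lt_or_ge j t with h' | h'
            · exact le_trans (hmax j hj1 h' hj3) (le_of_lt h.1)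
            · have : j = t := by omega
              exact le_of_eq (by rw [this])
          · intro j hj1 hj2
            rcases lt_or_ge (pvG A j) (pvG A l) with h' | h'
            · have := hmax j hj1 (by omega) h'
              omega
            · omega
        · next h =>
          refine ⟨hb1, by omega, hb3, ?_, hfirst⟩
          intro j hj1 hj2 hj3
          rcases lt_or_ge j t with h' | h'
          · exact hmax j hj1 h' hj3
          · have : j = t := by omega
            subst this
            rcases lt_or_ge (pvG A b) (pvG A j) with h'' | h''
            · exact absurd ⟨h'', hj3⟩ h
            · exact h''
      have := ih (t+1) _ (by omega) hstep
      have hmax1 : max (t+1) (A.length : Int) = (A.length : Int) := by omega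
      have hmax2 : max t (A.length : Int) = (A.length : Int) := by omega
      rw [hmax1] at this
      rw [hmax2]
      exact this
  exact fun t b hinv => key ((A.length : Int) - t).toNat t b rfl hinv

-- ===== VERDICT (by name: the statement is the Claim_ definition above) =====
-- the final value of B's left-scan is either -1 or nonnegative (never another negative)
lemma foldlLeft_cases (A : List Int) :
    ((PySem.List.pyRange 0 ((A.length : Int)-1) 1).foldl
      (fun l i => if pvG A (i+1) < pvG A i then i else l) (-1)) = -1 ∨
    0 ≤ ((PySem.List.pyRange 0 ((A.length : Int)-1) 1).foldl
      (fun l i => if pvG A (i+1) < pvG A i then i else l) (-1)) := by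
  have h0 : InvL A 0 (-1) := Or.inl ⟨rfl, fun i h0 hi => by omega⟩
  have := foldlLeft_aux A ((((A.length : Int) - 1) - 0).toNat) 0 (-1) rfl (by omega) h0
  rcases this with ⟨h1, _⟩ | ⟨h1, _⟩
  · exact Or.inl h1
  · exact Or.inr h1

-- ===== VERDICT (by name: the statement is the Claim_ definition above) =====
theorem prevPermOpt1_spec : Claim_equal_prevPermOpt1 := by
  unfold Claim_equal_prevPermOpt1
  intro A _
  unfold Spec_prevPermOpt1 prevPermOpt1 prevPermOpt1_alt
  dsimp only
  set lA : Int := pvFindLeft A ((A.length : Int) - 2) A.length with hlA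
  set lB : Int := (PySem.List.pyRange 0 ((A.length : Int)-1) 1).foldl
    (fun l i => if pvG A (i+1) < pvG A i then i else l) (-1) with hlB
  have hLA : LeftSpec A lA :=
    pvFindLeft_spec A A.length ((A.length : Int)-2) (by omega) (by omega) (fun i h1 h2 => by omega)
  have hLB : LeftSpec A lB := foldlLeft_spec A
  by_cases hneg : lA < 0
  · -- no descent: both return A unchanged
    have hBneg : lB < 0 := LeftSpec_neg A lA lB hLA hLB hneg
    have hB1 : lB = -1 := by rcases foldlLeft_cases A with h | h <;> omega
    rw [if_pos hneg, if_pos hB1]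
  · -- descent at lA = lB
    push Not at hneg
    have hBpos : 0 ≤ lB := by
      by_contra hc
      push Not at hc
      have := LeftSpec_neg A lB lA hLB hLA hc
      omega
    have heq : lA = lB := LeftSpec_unique A lA lB hLA hLB hneg hBpos
    rcases hLA with ⟨h, _⟩ | ⟨hl0, hln, hd, hasc⟩
    · omega
    rw [if_neg (by omega), if_neg (by omega)]
    -- A's right index
    have hr1 := pvRight1_spec A lA hd A.length ((A.length : Int)-1) (by omega) (by omega)
      (fun j h1 h2 => by omega) (by omega)
    set r1 : Int := pvRight1 A (pvG A lA) ((A.length : Int)-1) A.length with hr1def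
    obtain ⟨hc1, hc2, hc3, hc4⟩ := hr1
    have hr2 := pvRight2_spec A lA (pvG A r1) hc3 A.length r1 hc1 rfl (by omega)
    set r2 : Int := pvRight2 A r1 A.length with hr2def
    obtain ⟨hd1, hd2, hd3, hd4⟩ := hr2
    -- B's best index
    have hInit : Inv2 A lA (lA+2) (lA+1) := by
      refine ⟨le_refl _, by omega, hd, ?_, ?_⟩
      · intro j h1 h2 h3
        have : j = lA + 1 := by omega
        exact le_of_eq (by rw [this])
      · intro j h1 h2; omega
    have hbestInv := foldlBest_spec A lA (lA+2) (lA+1) hInit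
    rw [max_eq_right (by omega : lA + 2 ≤ (A.length : Int))] at hbestInv
    rw [← heq]
    set best : Int := (PySem.List.pyRange (lA+2) (A.length : Int) 1).foldl
      (fun b j => if pvG A b < pvG A j ∧ pvG A j < pvG A lA then j else b) (lA+1) with hbestdef
    obtain ⟨hb1, hb2, hb3, hbmax, hbfirst⟩ := hbestInv
    have hsorted := suffix_sorted A lA hasc
    -- best = r2
    have hs1 : pvG A r2 ≤ pvG A best := hbmax r2 hd1 (by omega) (by rw [hd3]; exact hc3)
    have hs2 : best ≤ r1 := by
      by_contra hc
      push Not at hc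
      have := hc4 best hc (by omega)
      omega
    have hs3 : pvG A best ≤ pvG A r1 := hsorted best r1 (by omega) hs2 (by omega)
    have hbv : pvG A best = pvG A r1 := by omega
    have hbr : best = r2 := by
      rcases lt_trichotomy best r2 with h | h | h
      · exfalso
        have h1 : pvG A best ≤ pvG A (r2-1) := hsorted best (r2-1) (by omega) (by omega) (by omega)
        have h2 : pvG A (r2-1) ≤ pvG A r2 := hsorted (r2-1) r2 (by omega) (by omega) (by omega)
        rw [hd3] at h2
        have : pvG A (r2-1) < pvG A r1 := lt_of_le_of_ne h2 hd4
        omega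
      · exact h
      · exfalso
        exact hbfirst r2 hd1 h (by rw [hd3, hbv])
    rw [hbr]
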